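-- pv_equiv track=rewrite | github.com/maxkashyap41/pythonDSA | Array/LargestNum_givenSum.py | LargestNum_givenSum
-- ===== SOURCE A (Python) =====
-- def LargestNum_givenSum(digit, Sum):
--     result = []
--     if Sum > (9*digit) or Sum == 0:
--         return -1
--     else:
--         while Sum > 9:
--             result.append(9)
--             Sum = Sum-9
--         result.append(Sum)
--
--
--     if len(result) == digit:
--         x = ''.join(map(str, result))
--         return int(x)
--     elif len(result) < digit:
--         n = digit-len(result)
--         for i in range(n):
--             result.append(0)
--         del i
--
--         x = ''.join(map(str, result))
--         return int(x)
-- ===== SOURCE B (Python) =====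
-- def LargestNum_givenSum(digit, Sum):
--     if Sum <= 0 or Sum > 9*digit:
--         return -1
--     q, r = divmod(Sum, 9)
--     s = '9'*q + (str(r) if r != 0 else '') + '0'*(digit - q - (1 if r != 0 else 0))
--     return int(s)
-- ===== Notes on version B (the rewrite author's own statement) =====
-- stated objective: simpler
-- what changed: The while-loop that appends 9s one at a time plus the range-loop padding are replaced by a single divmod(Sum, 9) and a closed-form digit string '9'*q + str(r) + '0'*pad; the guard rejects non-positive Sum instead of only Sum == 0.
-- intended difference: On negative Sum that passes A's overflow guard with digit >= 1 (except (1,-1), where both return -1), A returns the meaningless number str(Sum) padded with zeros (e.g. -500 for (3,-5)) while B returns the error sentinel -1, the intended signal since no number has a negative digit sum. — e.g. on LargestNum_givenSum(3, -5): A returns -500, B returns -1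
-- outside the precondition, e.g. on LargestNum_givenSum(0, -5): A returns None, B returns -1
import Mathlib
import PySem

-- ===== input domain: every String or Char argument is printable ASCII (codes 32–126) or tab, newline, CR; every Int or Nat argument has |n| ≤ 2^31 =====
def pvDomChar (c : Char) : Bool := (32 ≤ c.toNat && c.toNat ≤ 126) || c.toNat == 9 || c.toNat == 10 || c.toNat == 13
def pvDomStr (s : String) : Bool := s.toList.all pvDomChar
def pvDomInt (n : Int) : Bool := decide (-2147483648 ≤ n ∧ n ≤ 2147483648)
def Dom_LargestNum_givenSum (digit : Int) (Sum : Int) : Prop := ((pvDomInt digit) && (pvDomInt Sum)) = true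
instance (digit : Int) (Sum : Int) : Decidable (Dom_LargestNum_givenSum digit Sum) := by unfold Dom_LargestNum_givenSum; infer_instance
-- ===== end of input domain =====

-- B replaces A's repeated-subtraction loop and padding loop by one divmod and a
-- closed-form digit string, and rejects non-positive Sum with -1 (A returns a
-- zero-padded rendering of the negative Sum there; see D_ below). Objective: simpler.


-- ===== PORT A =====
-- the while loop: while Sum > 9: result.append(9); Sum -= 9, then result.append(Sum)
def pvBuildA (Sum : Int) (result : List Int) : List Int :=
  if 9 < Sum then pvBuildA (Sum - 9) (result ++ [9]) else result ++ [Sum]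
termination_by Sum.toNat
decreasing_by omega

def LargestNum_givenSum (digit : Int) (Sum : Int) : Int :=
  if Sum > 9 * digit ∨ Sum = 0 then -1
  else
    let result := pvBuildA Sum []
    if PySem.List.len result = digit then
      -- int(''.join(map(str, result))); never a ValueError here, so getD 0 is exact
      (PySem.Int.ofChars? (PySem.Chars.join [] (result.map PySem.Int.toChars))).getD 0
    else if PySem.List.len result < digit then
      let n := digit - PySem.List.len result
      let result := (PySem.List.pyRange 0 n 1).foldl (fun r _ => r ++ [(0 : Int)]) result
      (PySem.Int.ofChars? (PySem.Chars.join [] (result.map PySem.Int.toChars))).getD 0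
    else 0  -- Python falls off the end and returns None here; excluded by Pre_

-- ===== PORT B =====
def LargestNum_givenSum_alt (digit : Int) (Sum : Int) : Int :=
  if Sum ≤ 0 ∨ Sum > 9 * digit then -1
  else
    let q := PySem.Int.floordiv Sum 9
    let r := PySem.Int.mod Sum 9
    -- '9'*q + (str(r) if r != 0 else '') + '0'*pad, over code-point lists ('c'*k
    -- repeats max(k,0) times = List.replicate k.toNat); int(s) never raises here
    let s := List.replicate q.toNat '9'
             ++ (if r ≠ 0 then PySem.Int.toChars r else [])
             ++ List.replicate (digit - q - (if r ≠ 0 then 1 else 0)).toNat '0'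
    (PySem.Int.ofChars? s).getD 0

-- ===== PRECONDITION & SPEC =====
-- Pre_ excludes only the inputs where A returns None (not an int): negative Sum
-- passing A's overflow guard with no digit slot (digit ≤ 0), so A's final if/elif
-- both fail and the function falls off the end.
def Pre_LargestNum_givenSum (digit : Int) (Sum : Int) : Prop :=
  ¬ (Sum < 0 ∧ Sum ≤ 9 * digit ∧ digit ≤ 0)
instance (digit : Int) (Sum : Int) : Decidable (Pre_LargestNum_givenSum digit Sum) := by unfold Pre_LargestNum_givenSum; infer_instance
def pvWitness_LargestNum_givenSum : Int × Int := (3, 20)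

-- On negative Sum that passes A's overflow guard with digit ≥ 1 (except (1,-1),
-- where both return -1), A returns the meaningless number str(Sum) padded with
-- zeros (e.g. -500 for (3,-5)) while B returns the error sentinel -1, the intended
-- signal since no number has a negative digit sum.
def D_LargestNum_givenSum (digit : Int) (Sum : Int) : Prop :=
  Sum < 0 ∧ Sum ≤ 9 * digit ∧ 1 ≤ digit ∧ ¬ (digit = 1 ∧ Sum = -1)
instance (digit : Int) (Sum : Int) : Decidable (D_LargestNum_givenSum digit Sum) := by unfold D_LargestNum_givenSum; infer_instance

def Spec_LargestNum_givenSum (digit : Int) (Sum : Int) (out : Int) : Prop := ¬ D_LargestNum_givenSum digit Sum → out = LargestNum_givenSum_alt digit Sum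
instance (digit : Int) (Sum : Int) (out : Int) : Decidable (Spec_LargestNum_givenSum digit Sum out) := by unfold Spec_LargestNum_givenSum; infer_instance

def pvDiffWitness_LargestNum_givenSum : Int × Int := (3, -5)
def pvDiffWitnessOut_LargestNum_givenSum : Int × Int := (-500, -1)

-- ===== CLAIM (what is proved, stated in full; the proofs are below) =====
def Claim_unchanged_LargestNum_givenSum : Prop := ∀ (digit : Int) (Sum : Int), Dom_LargestNum_givenSum digit Sum → Pre_LargestNum_givenSum digit Sum → Spec_LargestNum_givenSum digit Sum (LargestNum_givenSum digit Sum)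
def Claim_changed_LargestNum_givenSum : Prop := Dom_LargestNum_givenSum (pvDiffWitness_LargestNum_givenSum.1) (pvDiffWitness_LargestNum_givenSum.2) ∧ Pre_LargestNum_givenSum (pvDiffWitness_LargestNum_givenSum.1) (pvDiffWitness_LargestNum_givenSum.2) ∧ D_LargestNum_givenSum (pvDiffWitness_LargestNum_givenSum.1) (pvDiffWitness_LargestNum_givenSum.2) ∧ LargestNum_givenSum (pvDiffWitness_LargestNum_givenSum.1) (pvDiffWitness_LargestNum_givenSum.2) = pvDiffWitnessOut_LargestNum_givenSum.1 ∧ LargestNum_givenSum_alt (pvDiffWitness_LargestNum_givenSum.1) (pvDiffWitness_LargestNum_givenSum.2) = pvDiffWitnessOut_LargestNum_givenSum.2 ∧ pvDiffWitnessOut_LargestNum_givenSum.1 ≠ pvDiffWitnessOut_LargestNum_givenSum.2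

-- ===== LEMMAS AND PROOFS =====

-- A's while loop: for 0 < S it yields (S-1)/9 nines followed by the remainder S - 9*((S-1)/9)
theorem pvBuildA_spec (S : Int) (hS : 0 < S) (acc : List Int) :
    pvBuildA S acc = acc ++ List.replicate ((S - 1) / 9).toNat 9 ++ [S - 9 * ((S - 1) / 9)] := by
  rw [pvBuildA]
  split
  · next h =>
    rw [pvBuildA_spec (S - 9) (by omega)]
    have h2 : ((S - 1) / 9).toNat = ((S - 9 - 1) / 9).toNat + 1 := by omega
    have h3 : S - 9 - 9 * ((S - 9 - 1) / 9) = S - 9 * ((S - 1) / 9) := by omega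
    rw [h2, h3, List.replicate_succ]
    simp
  · next h =>
    have h0 : (S - 1) / 9 = 0 := by omega
    simp [h0]
termination_by S.toNat
decreasing_by omega

theorem pv_foldl_append_zeros (L : List Int) (res : List Int) :
    L.foldl (fun r _ => r ++ [(0 : Int)]) res = res ++ List.replicate L.length 0 := by
  induction L generalizing res with
  | nil => simp
  | cons x xs ih =>
    rw [List.foldl_cons, ih]
    simp [List.replicate_succ]

theorem pv_join_nil_flatten (L : List (List Char)) :
    PySem.Chars.join [] L = L.flatten := by
  induction L with
  | nil => rfl
  | cons x xs ih =>
    cases xs with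
    | nil => simp [PySem.Chars.join, List.intercalate]
    | cons y ys =>
      have := PySem.Chars.join_cons_cons (sep := []) (p := x) (q := y) (rest := ys)
      rw [this, ih]
      simp

theorem pv_flatten_replicate_singleton (n : Nat) (c : Char) :
    (List.replicate n [c]).flatten = List.replicate n c := by
  induction n with
  | zero => rfl
  | succ k ih => simp [List.replicate_succ, ih]

-- the two ports agree whenever 0 < Sum ≤ 9*digit (the common live branch)
theorem pv_main_pos (digit Sum : Int) (hpos : 0 < Sum) (hle : Sum ≤ 9 * digit) :
    LargestNum_givenSum digit Sum = LargestNum_givenSum_alt digit Sum := by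
  unfold LargestNum_givenSum LargestNum_givenSum_alt
  rw [if_neg (by omega : ¬ (Sum > 9 * digit ∨ Sum = 0)),
      if_neg (by omega : ¬ (Sum ≤ 0 ∨ Sum > 9 * digit))]
  have hdig : 1 ≤ digit := by omega
  rw [pvBuildA_spec Sum hpos]
  set a : Nat := ((Sum - 1) / 9).toNat with ha
  set r' : Int := Sum - 9 * ((Sum - 1) / 9) with hr'
  have hr'b : 1 ≤ r' ∧ r' ≤ 9 := by constructor <;> omega
  rw [PySem.Int.floordiv_eq_ediv_of_pos (by norm_num), PySem.Int.mod_eq_emod_of_pos (by norm_num)]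
  set q : Int := Sum / 9 with hq
  set r : Int := Sum % 9 with hr
  have hdiglen : (a : Int) + 1 ≤ digit := by
    have : 9 * (a : Int) + 1 ≤ Sum := by omega
    omega
  have hlen : PySem.List.len ([] ++ List.replicate a (9 : Int) ++ [r']) = (a : Int) + 1 := by
    simp [PySem.List.len_eq]
  have hchars : ∀ z : Nat,
      PySem.Chars.join [] ((([] ++ List.replicate a (9 : Int) ++ [r'] ++ List.replicate z 0).map PySem.Int.toChars))
        = List.replicate a '9' ++ PySem.Int.toChars r' ++ List.replicate z '0' := by
    intro z
    rw [pv_join_nil_flatten]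
    simp only [List.nil_append, List.map_append, List.flatten_append, List.map_replicate]
    have h9 : PySem.Int.toChars (9 : Int) = ['9'] := by decide
    have h0 : PySem.Int.toChars (0 : Int) = ['0'] := by decide
    rw [h9, h0, pv_flatten_replicate_singleton, pv_flatten_replicate_singleton]
    simp
  have hkey : List.replicate a '9' ++ PySem.Int.toChars r'
        ++ List.replicate (digit - ((a : Int) + 1)).toNat '0'
      = List.replicate q.toNat '9'
        ++ (if r ≠ 0 then PySem.Int.toChars r else [])
        ++ List.replicate (digit - q - (if r ≠ 0 then 1 else 0)).toNat '0' := by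
    by_cases hr0 : r = 0
    · -- Sum = 9*q, a = q-1, r' = 9
      have hq1 : 1 ≤ q := by omega
      have haq : (a : Int) = q - 1 := by omega
      have hr9 : r' = 9 := by omega
      have hrep : List.replicate q.toNat '9' = List.replicate a '9' ++ ['9'] := by
        have : q.toNat = a + 1 := by omega
        rw [this, List.replicate_succ']
      rw [hrep, hr9]
      have hz : (digit - ((a : Int) + 1)).toNat = (digit - q - (if r ≠ 0 then 1 else 0)).toNat := by
        simp [hr0]; omega
      rw [hz]
      have h9 : PySem.Int.toChars (9 : Int) = ['9'] := by decide
      simp [hr0, h9]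
    · -- a = q, r' = r
      have haq : (a : Int) = q := by omega
      have hrr : r' = r := by omega
      have hz : (digit - ((a : Int) + 1)).toNat = (digit - q - (if r ≠ 0 then 1 else 0)).toNat := by
        simp [hr0]; omega
      have harep : List.replicate a '9' = List.replicate q.toNat '9' := by
        have : a = q.toNat := by omega
        rw [this]
      rw [harep, hrr, hz]
      simp [hr0]
  dsimp only
  split
  · next heq =>
    rw [hlen] at heq
    have hz0 : digit - ((a : Int) + 1) = 0 := by omega
    have := hchars 0
    simp only [List.replicate_zero, List.append_nil] at this
    rw [this]
    congr 2
    rw [← hkey, hz0]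
    simp
  · next hne2 =>
    split
    · next hlt =>
      rw [hlen] at hlt
      rw [hlen, pv_foldl_append_zeros]
      have hlenR : (PySem.List.pyRange 0 (digit - ((a : Int) + 1)) 1).length
          = (digit - ((a : Int) + 1)).toNat := by
        simp [PySem.List.pyRange]
        omega
      rw [hlenR]
      rw [hchars (digit - ((a : Int) + 1)).toNat]
      rw [hkey]
    · next hge =>
      rw [hlen] at hne2 hge
      omega

-- ===== VERDICT (by name: the statement is the Claim_ definition above) =====
theorem LargestNum_givenSum_spec : Claim_unchanged_LargestNum_givenSum := by
  intro digit Sum _hdom hpre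
  unfold Spec_LargestNum_givenSum
  intro hnD
  by_cases hg : Sum > 9 * digit ∨ Sum = 0
  · unfold LargestNum_givenSum LargestNum_givenSum_alt
    rw [if_pos hg, if_pos (by omega : Sum ≤ 0 ∨ Sum > 9 * digit)]
  · have hle : Sum ≤ 9 * digit := by omega
    have hne : Sum ≠ 0 := by omega
    by_cases hneg : Sum < 0
    · have hd1 : 1 ≤ digit := by
        unfold Pre_LargestNum_givenSum at hpre
        omega
      have hds : digit = 1 ∧ Sum = -1 := by
        by_contra h
        exact hnD ⟨hneg, hle, hd1, h⟩
      obtain ⟨h1, h2⟩ := hds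
      subst h1; subst h2
      have hb : pvBuildA (-1) [] = [-1] := by rw [pvBuildA]; norm_num
      unfold LargestNum_givenSum LargestNum_givenSum_alt
      rw [if_neg (by decide), hb, if_pos (by decide)]
      decide
    · exact pv_main_pos digit Sum (by omega) hle

theorem LargestNum_givenSum_changed : Claim_changed_LargestNum_givenSum := by
  unfold Claim_changed_LargestNum_givenSum
  have hb : pvBuildA (-5) [] = [-5] := by rw [pvBuildA]; norm_num
  have hA : LargestNum_givenSum 3 (-5) = -500 := by
    unfold LargestNum_givenSum
    rw [if_neg (by decide), hb]
    decide
  exact ⟨by decide, by decide, by decide, hA, by decide, by decide⟩
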